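-- pv_equiv track=rewrite | github.com/YeshaRavani/Water_data_extraction | replace_location_names.py | clean_location
-- ===== SOURCE A (Python) =====
-- def clean_location(loc: str, mapping: dict) -> str:
--     """Replace shortform in location string with full name."""
--     if not loc:
--         return loc
--
--     # Try exact match first
--     loc_clean = loc.strip().strip('"')
--     if loc_clean in mapping:
--         return mapping[loc_clean]
--
--     # Try partial replacement (e.g. "PJ" in "Prayagraj (PJ)")
--     # Sort keys by length descending to avoid partial matches on shorter codes
--     for shortform in sorted(mapping.keys(), key=len, reverse=True):
--         if shortform in loc:
--             return mapping[shortform]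
--
--     return loc
-- ===== SOURCE B (Python) =====
-- def clean_location(loc: str, mapping: dict) -> str:
--     """Replace shortform in location string with full name."""
--     if not loc:
--         return loc
--
--     # Try exact match first
--     loc_clean = loc.strip().strip('"')
--     if loc_clean in mapping:
--         return mapping[loc_clean]
--
--     # Longest substring match by a single pass (strictly-greater update keeps
--     # the first key in dict order among equal lengths, like the sorted scan).
--     best_key = None
--     best_val = None
--     for k, v in mapping.items():
--         if k in loc and (best_key is None or len(k) > len(best_key)):
--             best_key, best_val = k, v
--     return best_val if best_key is not None else loc
-- ===== Notes on version B (the rewrite author's own statement) =====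
-- stated objective: simpler
-- what changed: The partial-match phase no longer sorts the keys by length: a single pass over mapping.items() keeps the longest matching key seen so far (updating only on strictly greater length, which preserves A's dict-order tie-break) and returns its value.
import Mathlib
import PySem

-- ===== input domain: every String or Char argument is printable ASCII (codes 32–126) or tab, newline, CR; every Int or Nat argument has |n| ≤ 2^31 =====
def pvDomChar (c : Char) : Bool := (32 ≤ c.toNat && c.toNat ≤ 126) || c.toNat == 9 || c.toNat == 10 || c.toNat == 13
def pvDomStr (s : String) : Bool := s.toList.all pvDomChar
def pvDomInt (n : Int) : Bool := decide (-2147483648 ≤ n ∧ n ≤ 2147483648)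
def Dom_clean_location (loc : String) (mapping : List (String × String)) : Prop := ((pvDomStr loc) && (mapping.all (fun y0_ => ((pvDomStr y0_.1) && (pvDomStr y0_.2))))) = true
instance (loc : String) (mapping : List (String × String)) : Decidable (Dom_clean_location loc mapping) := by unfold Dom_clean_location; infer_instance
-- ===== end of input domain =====

-- B drops the per-call sort of the keys: one pass over the dict keeps the longest
-- matching key (strictly-greater update = A's dict-order tie-break). Objective: simpler.

-- ===== PORT A =====
-- the 'for shortform in sorted(...): if shortform in loc: return mapping[shortform]' loop
def cleanLoopA (loc : String) (d : PySem.Dict String String) : List String → String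
  | [] => loc
  | k :: t => if PySem.Str.isIn k loc then (d.get? k).getD loc else cleanLoopA loc d t

def clean_location (loc : String) (mapping : List (String × String)) : String :=
  let d := PySem.Dict.ofList mapping
  if loc = "" then loc
  else
    let loc_clean := PySem.Str.stripChars (PySem.Str.strip loc) "\""
    match d.get? loc_clean with
    | some v => v
    | none => cleanLoopA loc d (PySem.List.sorted d.keys (fun k => PySem.Str.len k) true)

-- ===== PORT B =====
-- one step of B's running-best loop: update only on a strictly longer matching key
def bestStep (loc : String) (best : Option (String × String)) (kv : String × String) :
    Option (String × String) :=
  if PySem.Str.isIn kv.1 loc &&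
      (match best with
       | none => true
       | some b => decide (PySem.Str.len b.1 < PySem.Str.len kv.1)) then
    some kv
  else best

def clean_location_alt (loc : String) (mapping : List (String × String)) : String :=
  let d := PySem.Dict.ofList mapping
  if loc = "" then loc
  else
    let loc_clean := PySem.Str.stripChars (PySem.Str.strip loc) "\""
    match d.get? loc_clean with
    | some v => v
    | none =>
      match d.items.foldl (bestStep loc) none with
      | some kv => kv.2
      | none => loc

-- ===== PRECONDITION & SPEC =====
def Spec_clean_location (loc : String) (mapping : List (String × String)) (out : String) : Prop := out = clean_location_alt loc mapping
instance (loc : String) (mapping : List (String × String)) (out : String) : Decidable (Spec_clean_location loc mapping out) := by unfold Spec_clean_location; infer_instance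

-- ===== CLAIM (what is proved, stated in full; the proofs are below) =====
def Claim_equal_clean_location : Prop := ∀ (loc : String) (mapping : List (String × String)), Dom_clean_location loc mapping → Spec_clean_location loc mapping (clean_location loc mapping)

-- ===== LEMMAS AND PROOFS =====

-- left-biased "longer wins" combination of optional candidates
def pvMerge {α : Type} (len : α → Int) (a b : Option α) : Option α :=
  match a, b with
  | none, b => b
  | some a', none => some a'
  | some a', some b' => if len a' < len b' then some b' else some a'

-- the leftmost longest element of the list satisfying p
def pvBest {α : Type} (len : α → Int) (p : α → Bool) : List α → Option α
  | [] => none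
  | x :: t => pvMerge len (if p x then some x else none) (pvBest len p t)

theorem pvMerge_assoc {α : Type} (len : α → Int) (a b c : Option α) :
    pvMerge len (pvMerge len a b) c = pvMerge len a (pvMerge len b c) := by
  rcases a with _ | a <;> rcases b with _ | b <;> rcases c with _ | c <;>
    simp only [pvMerge] <;> split_ifs <;> (try simp only [pvMerge]) <;> split_ifs <;>
    first | rfl | (exfalso; omega)

theorem bestStep_eq_merge (loc : String) (acc : Option (String × String)) (kv : String × String) :
    bestStep loc acc kv =
      pvMerge (fun kv => PySem.Str.len kv.1) acc
        (if PySem.Str.isIn kv.1 loc then some kv else none) := by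
  rcases acc with _ | b
  · by_cases h : PySem.Str.isIn kv.1 loc = true <;>
      simp only [bestStep, pvMerge, h, Bool.true_and, Bool.false_and, if_true,
        Bool.false_eq_true, if_false]
  · by_cases h : PySem.Str.isIn kv.1 loc = true
    · by_cases hlt : PySem.Str.len b.1 < PySem.Str.len kv.1 <;>
        simp only [bestStep, pvMerge, h, Bool.true_and, decide_eq_true_eq, if_true]
    · simp only [bestStep, pvMerge, h, Bool.false_and, Bool.false_eq_true, if_false]

theorem foldl_bestStep (loc : String) (l : List (String × String))
    (acc : Option (String × String)) :
    l.foldl (bestStep loc) acc =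
      pvMerge (fun kv => PySem.Str.len kv.1) acc
        (pvBest (fun kv => PySem.Str.len kv.1) (fun kv => PySem.Str.isIn kv.1 loc) l) := by
  induction l generalizing acc with
  | nil => cases acc <;> rfl
  | cons x t ih =>
    simp only [List.foldl_cons, ih, bestStep_eq_merge, pvBest, pvMerge_assoc]

theorem insertBy_cons_pos (len : String → Int) (x y : String) (ys : List String)
    (h : len y < len x) :
    PySem.List.insertBy (fun a b => decide (len b < len a)) x (y :: ys) = x :: y :: ys := by
  simp [PySem.List.insertBy, h]

theorem insertBy_cons_neg (len : String → Int) (x y : String) (ys : List String)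
    (h : ¬ len y < len x) :
    PySem.List.insertBy (fun a b => decide (len b < len a)) x (y :: ys) =
      y :: PySem.List.insertBy (fun a b => decide (len b < len a)) x ys := by
  simp [PySem.List.insertBy, h]

theorem insertBy_pairwise (len : String → Int) (x : String) (acc : List String)
    (h : acc.Pairwise (fun a b => len b ≤ len a)) :
    (PySem.List.insertBy (fun a b => decide (len b < len a)) x acc).Pairwise
      (fun a b => len b ≤ len a) := by
  induction acc with
  | nil => simp [PySem.List.insertBy]
  | cons y ys ih =>
    rw [List.pairwise_cons] at h
    by_cases hxy : len y < len x
    · rw [insertBy_cons_pos len x y ys hxy]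
      refine List.pairwise_cons.2 ⟨?_, List.pairwise_cons.2 h⟩
      intro z hz
      rcases List.mem_cons.1 hz with hz | hz
      · subst hz; omega
      · have := h.1 _ hz; omega
    · rw [insertBy_cons_neg len x y ys hxy]
      refine List.pairwise_cons.2 ⟨?_, ih h.2⟩
      intro z hz
      rcases (PySem.List.mem_insertBy _ x z ys).1 hz with hz | hz
      · subst hz; omega
      · exact h.1 _ hz

theorem find?_insertBy (len : String → Int) (p : String → Bool) (x : String) (acc : List String)
    (h : acc.Pairwise (fun a b => len b ≤ len a)) :
    (PySem.List.insertBy (fun a b => decide (len b < len a)) x acc).find? p =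
      pvMerge len (acc.find? p) (if p x then some x else none) := by
  induction acc with
  | nil =>
    by_cases hp : p x = true <;> simp [PySem.List.insertBy, List.find?, hp, pvMerge]
  | cons y ys ih =>
    rw [List.pairwise_cons] at h
    by_cases hxy : len y < len x
    · rw [insertBy_cons_pos len x y ys hxy]
      by_cases hpx : p x = true
      · rw [List.find?_cons_of_pos hpx, if_pos hpx]
        rcases hf : List.find? p (y :: ys) with _ | a
        · rfl
        · have ha := List.mem_of_find?_eq_some hf
          have hlen : len a ≤ len y := by
            rcases List.mem_cons.1 ha with ha | ha
            · subst ha; omega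
            · exact h.1 _ ha
          simp only [pvMerge]
          rw [if_pos (by omega)]
      · rw [List.find?_cons_of_neg hpx, if_neg hpx]
        cases List.find? p (y :: ys) <;> rfl
    · rw [insertBy_cons_neg len x y ys hxy]
      by_cases hpy : p y = true
      · rw [List.find?_cons_of_pos hpy, List.find?_cons_of_pos hpy]
        by_cases hpx : p x = true
        · rw [if_pos hpx]
          simp only [pvMerge]
          rw [if_neg (by omega)]
        · rw [if_neg hpx]; rfl
      · rw [List.find?_cons_of_neg hpy, List.find?_cons_of_neg hpy, ih h.2]

theorem find?_foldl_insertBy (len : String → Int) (p : String → Bool) (ks : List String)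
    (acc : List String) (h : acc.Pairwise (fun a b => len b ≤ len a)) :
    (ks.foldl (fun acc x => PySem.List.insertBy (fun a b => decide (len b < len a)) x acc)
        acc).find? p =
      pvMerge len (acc.find? p) (pvBest len p ks) := by
  induction ks generalizing acc with
  | nil =>
    simp only [List.foldl_nil, pvBest]
    cases acc.find? p <;> rfl
  | cons x t ih =>
    simp only [List.foldl_cons, pvBest]
    rw [ih _ (insertBy_pairwise len x acc h), find?_insertBy len p x acc h, pvMerge_assoc]

theorem find?_sorted (len : String → Int) (p : String → Bool) (ks : List String) :
    (PySem.List.sorted ks len true).find? p = pvBest len p ks := by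
  have := find?_foldl_insertBy len p ks [] (by simp)
  simpa [PySem.List.sorted] using this

theorem cleanLoopA_eq_find? (loc : String) (d : PySem.Dict String String) (ks : List String) :
    cleanLoopA loc d ks =
      match ks.find? (fun k => PySem.Str.isIn k loc) with
      | some k => (d.get? k).getD loc
      | none => loc := by
  induction ks with
  | nil => rfl
  | cons k t ih =>
    by_cases h : PySem.Str.isIn k loc = true
    · rw [List.find?_cons_of_pos (p := fun k => PySem.Str.isIn k loc) h]
      simp only [cleanLoopA, if_pos h]
    · rw [List.find?_cons_of_neg (p := fun k => PySem.Str.isIn k loc) h]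
      simp only [cleanLoopA, if_neg h, ih]

theorem pvBest_map_fst (loc : String) (l : List (String × String)) :
    pvBest PySem.Str.len (fun k => PySem.Str.isIn k loc) (l.map Prod.fst) =
      Option.map Prod.fst
        (pvBest (fun kv => PySem.Str.len kv.1) (fun kv => PySem.Str.isIn kv.1 loc) l) := by
  induction l with
  | nil => rfl
  | cons x t ih =>
    simp only [List.map_cons, pvBest, ih]
    cases hb : pvBest (fun kv => PySem.Str.len kv.1) (fun kv => PySem.Str.isIn kv.1 loc) t with
    | none =>
      by_cases h : PySem.Str.isIn x.1 loc = true <;>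
        simp only [pvMerge, Option.map_none, Option.map_some, h, Bool.false_eq_true,
          if_false, if_true]
    | some b =>
      by_cases h : PySem.Str.isIn x.1 loc = true
      · by_cases hlt : PySem.Str.len x.1 < PySem.Str.len b.1
        · simp only [pvMerge, Option.map_some, h, if_true]
          rw [if_pos hlt, if_pos hlt]
          rfl
        · simp only [pvMerge, Option.map_some, h, if_true]
          rw [if_neg hlt, if_neg hlt]
          rfl
      · simp only [pvMerge, Option.map_some, h, Bool.false_eq_true, if_false]

theorem pvBest_mem {α : Type} (len : α → Int) (p : α → Bool) (l : List α) (x : α)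
    (h : pvBest len p l = some x) : x ∈ l := by
  induction l generalizing x with
  | nil => simp [pvBest] at h
  | cons y t ih =>
    simp only [pvBest] at h
    cases hb : pvBest len p t with
    | none =>
      rw [hb] at h
      by_cases hp : p y = true
      · rw [if_pos hp] at h
        simp only [pvMerge] at h
        injection h with h
        subst h
        exact List.mem_cons_self
      · rw [if_neg hp] at h
        simp only [pvMerge] at h
        cases h
    | some b =>
      rw [hb] at h
      by_cases hp : p y = true
      · rw [if_pos hp] at h
        simp only [pvMerge] at h
        split_ifs at h
        · injection h with h
          subst h
          exact List.mem_cons_of_mem _ (ih _ hb)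
        · injection h with h
          subst h
          exact List.mem_cons_self
      · rw [if_neg hp] at h
        simp only [pvMerge] at h
        injection h with h
        subst h
        exact List.mem_cons_of_mem _ (ih _ hb)

theorem assoc_find (l : List (String × String)) (kv : String × String)
    (hn : (l.map Prod.fst).Nodup) (h : kv ∈ l) :
    l.find? (fun p => p.1 == kv.1) = some kv := by
  induction l with
  | nil => simp at h
  | cons y t ih =>
    simp only [List.map_cons, List.nodup_cons] at hn
    rcases List.mem_cons.1 h with h | h
    · subst h; exact List.find?_cons_of_pos (p := fun q : String × String => q.1 == kv.1) (by simp)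
    · have hne : ¬(y.1 == kv.1) = true := by
        simp only [beq_iff_eq]
        intro he
        exact hn.1 (he ▸ List.mem_map_of_mem h)
      rw [List.find?_cons_of_neg (p := fun q : String × String => q.1 == kv.1) hne, ih hn.2 h]

theorem get?_of_mem_items (d : PySem.Dict String String) (kv : String × String)
    (hn : d.keys.Nodup) (h : kv ∈ d.items) : d.get? kv.1 = some kv.2 := by
  have := assoc_find d.items kv hn h
  simp [PySem.Dict.get?, this]

-- ===== VERDICT (by name: the statement is the Claim_ definition above) =====
theorem clean_location_spec : Claim_equal_clean_location := by
  intro loc mapping _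
  unfold Spec_clean_location clean_location clean_location_alt
  by_cases hl : loc = ""
  · subst hl; simp
  · simp only [if_neg hl]
    rcases hg : (PySem.Dict.ofList mapping).get?
        (PySem.Str.stripChars (PySem.Str.strip loc) "\"") with _ | v
    · simp only
      rw [cleanLoopA_eq_find?, find?_sorted]
      have hkeys : (PySem.Dict.ofList mapping).keys =
          (PySem.Dict.ofList mapping).items.map Prod.fst := rfl
      rw [hkeys, pvBest_map_fst, foldl_bestStep]
      rcases hb : pvBest (fun kv => PySem.Str.len kv.1) (fun kv => PySem.Str.isIn kv.1 loc)
          (PySem.Dict.ofList mapping).items with _ | kv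
      · simp only [hb, Option.map_none, pvMerge]
      · have hmem := pvBest_mem _ _ _ _ hb
        have hget := get?_of_mem_items (PySem.Dict.ofList mapping) kv
          (PySem.Dict.nodup_keys_ofList mapping) hmem
        simp only [hb, Option.map_some, pvMerge, hget, Option.getD_some]
    · rfl
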